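-- pv_equiv track=rewrite | github.com/LinTing-pl/Code | leetcode/editor/cn/[LCS 02]完成一半题目.py | halfQuestions
-- ===== SOURCE A (Python) =====
-- import collections
--
-- def halfQuestions(questions):
--     """
--     :type questions: List[int]
--     :rtype: int
--     """
--     n, cnt, res = len(questions) // 2, 0, 0
--     hs = collections.Counter(questions)
--     ls = list(hs.items())
--     ls.sort(key=lambda x: x[-1], reverse=True)
--     for i, j in ls:
--         cnt += j
--         res += 1
--         if cnt >= n: break
--     return res
-- ===== SOURCE B (Python) =====
-- import collections
--
-- def halfQuestions(questions):
--     if not questions: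
--         return 0
--     freq = collections.Counter(questions)
--     bucket = collections.Counter(freq.values())
--     need = len(questions) // 2
--     cnt = res = 0
--     for f in range(max(bucket), 0, -1):
--         k = bucket[f]
--         if k == 0:
--             continue
--         if cnt + f * k >= need:
--             t = -((cnt - need) // f)
--             return res + (t if t > 1 else 1)
--         cnt += f * k
--         res += k
--     return res
-- ===== Notes on version B (the rewrite author's own statement) =====
-- stated objective: faster
-- what changed: B replaces A's comparison sort of the (topic, count) pairs by a Counter-of-counts bucket table scanned from the maximal frequency down to 1, consuming each bucket arithmetically (whole block at once, ceiling division for the final block) instead of picking topics one by one.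
import Mathlib
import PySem

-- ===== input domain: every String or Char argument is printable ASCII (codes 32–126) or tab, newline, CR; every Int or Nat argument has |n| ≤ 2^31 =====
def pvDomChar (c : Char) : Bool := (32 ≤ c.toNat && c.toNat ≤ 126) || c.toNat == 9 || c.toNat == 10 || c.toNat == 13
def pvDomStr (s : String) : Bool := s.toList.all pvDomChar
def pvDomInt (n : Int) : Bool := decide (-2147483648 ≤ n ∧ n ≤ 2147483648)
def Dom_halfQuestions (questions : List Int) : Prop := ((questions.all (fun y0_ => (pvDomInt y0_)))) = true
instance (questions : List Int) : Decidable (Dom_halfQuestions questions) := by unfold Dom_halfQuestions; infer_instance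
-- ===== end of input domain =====

-- B replaces A's sort of the frequency table by a Counter-of-counts bucket table scanned
-- from the maximal frequency down, consuming each bucket arithmetically (objective: faster).


-- ===== PORT A =====
-- A's 'for i, j in ls: cnt += j; res += 1; if cnt >= n: break'
def pvALoop (n : Int) : List (Int × Int) → Int → Int → Int
  | [], _, res => res
  | (_, j) :: rest, cnt, res =>
      if cnt + j ≥ n then res + 1 else pvALoop n rest (cnt + j) (res + 1)

def halfQuestions (questions : List Int) : Int :=
  let n := PySem.Int.floordiv (PySem.List.len questions) 2
  let hs := PySem.Dict.counter questions
  let ls := PySem.List.sorted hs.items (fun x => x.2) true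
  pvALoop n ls 0 0

-- ===== PORT B =====
-- B's 'for f in range(max(bucket), 0, -1): k = bucket[f]; …' with the arithmetic block take:
-- 't = -((cnt - need) // f); return res + (t if t > 1 else 1)'
def pvBOuter (need : Int) (bucket : PySem.Dict Int Int) : List Int → Int → Int → Int
  | [], _, res => res
  | f :: rest, cnt, res =>
      let k := bucket.getD f 0
      if k = 0 then pvBOuter need bucket rest cnt res
      else if cnt + f * k ≥ need then
        let t := -(PySem.Int.floordiv (cnt - need) f)
        res + (if t > 1 then t else 1)
      else pvBOuter need bucket rest (cnt + f * k) (res + k)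

def halfQuestions_alt (questions : List Int) : Int :=
  if questions = [] then 0          -- 'if not questions: return 0'
  else
    let freq := PySem.Dict.counter questions
    let bucket := PySem.Dict.counter freq.values
    let need := PySem.Int.floordiv (PySem.List.len questions) 2
    -- 'max(bucket)': questions ≠ [] makes bucket nonempty, so Python's max cannot raise
    -- and max? is some; the getD 0 default is never used
    let maxf := (PySem.List.max? bucket.keys (fun x => x)).getD 0
    pvBOuter need bucket (PySem.List.pyRange maxf 0 (-1)) 0 0

-- ===== PRECONDITION & SPEC =====
def Spec_halfQuestions (questions : List Int) (out : Int) : Prop := out = halfQuestions_alt questions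
instance (questions : List Int) (out : Int) : Decidable (Spec_halfQuestions questions out) := by unfold Spec_halfQuestions; infer_instance

-- ===== CLAIM (what is proved, stated in full; the proofs are below) =====
def Claim_equal_halfQuestions : Prop := ∀ (questions : List Int), Dom_halfQuestions questions → Spec_halfQuestions questions (halfQuestions questions)

-- ===== LEMMAS AND PROOFS =====

-- the greedy core both programs realise: consume counts in the given order until the half is reached
def pvGreedy (n : Int) : List Int → Int → Int → Int
  | [], _, res => res
  | j :: rest, cnt, res =>
      if cnt + j ≥ n then res + 1 else pvGreedy n rest (cnt + j) (res + 1)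

theorem pvALoop_eq_greedy (n : Int) (ls : List (Int × Int)) (cnt res : Int) :
    pvALoop n ls cnt res = pvGreedy n (ls.map Prod.snd) cnt res := by
  induction ls generalizing cnt res with
  | nil => rfl
  | cons p rest ih =>
      obtain ⟨i, j⟩ := p
      simp only [pvALoop, List.map, pvGreedy]
      split_ifs <;> simp [ih]

-- the greedy walk through one block of k equal counts f that reaches the goal: the closed form
theorem pvGreedy_block_hit (n f : Int) (hf : 0 < f) :
    ∀ (k : Nat) (cnt res : Int) (tail : List Int), 1 ≤ k → n ≤ cnt + f * k →
    pvGreedy n (List.replicate k f ++ tail) cnt res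
      = res + (if -(PySem.Int.floordiv (cnt - n) f) > 1 then -(PySem.Int.floordiv (cnt - n) f) else 1) := by
  intro k
  induction k with
  | zero => omega
  | succ k ih =>
      intro cnt res tail _ hhit
      rw [List.replicate_succ, List.cons_append]
      simp only [pvGreedy]
      by_cases hstep : cnt + f ≥ n
      · -- the first pick finishes: the ceiling is ≤ 1
        have ht : ¬ PySem.Int.floordiv (cnt - n) f < -1 := by
          rw [PySem.Int.floordiv_lt_iff_lt_mul hf]
          omega
        rw [if_pos hstep, if_neg (by omega)]
      · have hk : 1 ≤ k := by
          rcases Nat.eq_zero_or_pos k with h0 | h1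
          · exfalso; subst h0; simp at hhit; omega
          · exact h1
        have hexp : f * ((k : Int) + 1) = f * (k : Int) + f := by ring
        have hhit' : n ≤ (cnt + f) + f * (k : Int) := by push_cast at hhit; omega
        rw [if_neg hstep, ih (cnt + f) (res + 1) tail hk hhit']
        -- ceil((n - cnt)/f) decreases by exactly one after one pick
        have hshift : PySem.Int.floordiv (cnt + f - n) f = PySem.Int.floordiv (cnt - n) f + 1 := by
          rw [PySem.Int.floordiv_eq_ediv_of_pos hf, PySem.Int.floordiv_eq_ediv_of_pos hf]
          have h := Int.add_mul_ediv_right (cnt - n) 1 (by omega : f ≠ 0)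
          have : cnt + f - n = cnt - n + 1 * f := by ring
          rw [this, h]
        have hbig : PySem.Int.floordiv (cnt - n) f < -1 := by
          rw [PySem.Int.floordiv_lt_iff_lt_mul hf]
          omega
        rw [hshift]
        generalize PySem.Int.floordiv (cnt - n) f = x at hbig ⊢
        split_ifs <;> omega

-- the greedy walk through one block of k equal counts f that does NOT reach the goal
theorem pvGreedy_block_pass (n f : Int) (hf : 0 < f) :
    ∀ (k : Nat) (cnt res : Int) (tail : List Int), cnt + f * k < n →
    pvGreedy n (List.replicate k f ++ tail) cnt res = pvGreedy n tail (cnt + f * k) (res + k) := by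
  intro k
  induction k with
  | zero => intro cnt res tail _; simp
  | succ k ih =>
      intro cnt res tail hmiss
      rw [List.replicate_succ, List.cons_append]
      simp only [pvGreedy]
      have hexp : f * ((k : Int) + 1) = f * (k : Int) + f := by ring
      have hknn : 0 ≤ f * (k : Int) := by positivity
      have hstep : ¬ cnt + f ≥ n := by push_cast at hmiss; omega
      have hmiss' : (cnt + f) + f * (k : Int) < n := by push_cast at hmiss; omega
      rw [if_neg hstep, ih (cnt + f) (res + 1) tail hmiss']
      congr 1 <;> push_cast <;> ring

theorem pvBOuter_eq_greedy (n : Int) (bucket : PySem.Dict Int Int) (fs : List Int)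
    (hpos : ∀ f ∈ fs, 0 < f) (hnn : ∀ f : Int, 0 ≤ bucket.getD f 0) (cnt res : Int) :
    pvBOuter n bucket fs cnt res
      = pvGreedy n (fs.flatMap (fun f => List.replicate (bucket.getD f 0).toNat f)) cnt res := by
  induction fs generalizing cnt res with
  | nil => rfl
  | cons f rest ih =>
      have hf : 0 < f := hpos f (List.mem_cons_self ..)
      have hrest : ∀ g ∈ rest, 0 < g := fun g hg => hpos g (List.mem_cons_of_mem _ hg)
      have hk : ((bucket.getD f 0).toNat : Int) = bucket.getD f 0 := Int.toNat_of_nonneg (hnn f)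
      by_cases h0 : bucket.getD f 0 = 0
      · simp only [pvBOuter, h0, List.flatMap_cons, Int.toNat_zero,
          List.replicate_zero, List.nil_append, if_true]
        exact ih hrest cnt res
      · by_cases hhit : cnt + f * bucket.getD f 0 ≥ n
        · simp only [pvBOuter, if_neg h0, if_pos hhit, List.flatMap_cons]
          rw [pvGreedy_block_hit n f hf (bucket.getD f 0).toNat cnt res _ (by omega) (by rw [hk]; omega)]
        · simp only [pvBOuter, if_neg h0, if_neg hhit, List.flatMap_cons]
          rw [pvGreedy_block_pass n f hf (bucket.getD f 0).toNat cnt res _ (by rw [hk]; omega), hk]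
          exact ih hrest _ _

-- flatMap of replicated counts is a permutation of vals when l is nodup and covers vals
theorem pvFlatMap_count (l vals : List Int) (x : Int) (hnd : l.Nodup) :
    (l.flatMap (fun f => List.replicate (vals.count f) f)).count x
      = if x ∈ l then vals.count x else 0 := by
  induction l with
  | nil => simp
  | cons a rest ih =>
      simp only [List.flatMap_cons, List.count_append, List.nodup_cons] at *
      rw [ih hnd.2, List.count_replicate]
      by_cases hxa : x = a
      · subst hxa
        simp [hnd.1]
      · simp [hxa, Ne.symm hxa]

theorem pvFlatMap_perm (l vals : List Int) (hnd : l.Nodup) (hcov : ∀ v ∈ vals, v ∈ l) :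
    (l.flatMap (fun f => List.replicate (vals.count f) f)).Perm vals := by
  rw [List.perm_iff_count]
  intro x
  rw [pvFlatMap_count l vals x hnd]
  by_cases hx : x ∈ l
  · simp [hx]
  · simp only [hx, if_false]
    by_cases hv : x ∈ vals
    · exact absurd (hcov x hv) hx
    · simp [List.count_eq_zero_of_not_mem hv]

theorem pvFlatMap_sorted (l : List Int) (k : Int → Nat) (hp : l.Pairwise (· > ·)) :
    (l.flatMap (fun f => List.replicate (k f) f)).Pairwise (· ≥ ·) := by
  induction l with
  | nil => simp
  | cons a rest ih =>
      rw [List.pairwise_cons] at hp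
      simp only [List.flatMap_cons]
      rw [List.pairwise_append]
      refine ⟨List.pairwise_replicate.mpr (Or.inr (le_refl a)), ih hp.2, ?_⟩
      intro x hx y hy
      rw [List.eq_of_mem_replicate hx]
      obtain ⟨b, hb, hyb⟩ := List.mem_flatMap.mp hy
      rw [List.eq_of_mem_replicate hyb]
      exact le_of_lt (hp.1 b hb)

-- the two orderings of the multiset of counts coincide, for any upper bound M on the counts
theorem pvCounts_eq (questions : List Int) (M : Int)
    (hM : ∀ v ∈ (PySem.Dict.counter questions).values, v ≤ M) :
    ((PySem.List.sorted (PySem.Dict.counter questions).items (fun x => x.2) true).map Prod.snd)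
    = (PySem.List.pyRange M 0 (-1)).flatMap
        (fun f => List.replicate ((PySem.Dict.counter (PySem.Dict.counter questions).values).getD f 0).toNat f) := by
  have hbucket : ∀ f : Int,
      ((PySem.Dict.counter (PySem.Dict.counter questions).values).getD f 0).toNat
        = (PySem.Dict.counter questions).values.count f := by
    intro f
    rw [PySem.Dict.getD_counter]
    exact Int.toNat_natCast _
  simp only [hbucket]
  have hnd : (PySem.List.pyRange M 0 (-1)).Nodup := by
    rw [PySem.List.pyRange_neg_one_eq_reverse]
    exact List.nodup_reverse.mpr (PySem.List.nodup_pyRange_one _ _)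
  have hvals : (PySem.Dict.counter questions).values
      = (PySem.Set.ofList questions).map (fun k => (questions.count k : Int)) := by
    simp only [PySem.Dict.values, PySem.Dict.items_counter, List.map_map]
    rfl
  have hcov : ∀ v ∈ (PySem.Dict.counter questions).values,
      v ∈ PySem.List.pyRange M 0 (-1) := by
    intro v hv
    rw [PySem.List.mem_pyRange_neg_one]
    refine ⟨?_, hM v hv⟩
    rw [hvals] at hv
    obtain ⟨k, hk, rfl⟩ := List.mem_map.mp hv
    have hk' : k ∈ questions := (PySem.Set.mem_ofList questions k).mp hk
    have h1 : 0 < questions.count k := List.count_pos_iff.mpr hk'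
    exact_mod_cast h1
  have hpermB := pvFlatMap_perm _ ((PySem.Dict.counter questions).values) hnd hcov
  have hsortB := pvFlatMap_sorted (PySem.List.pyRange M 0 (-1))
      (fun f => (PySem.Dict.counter questions).values.count f)
      (by rw [PySem.List.pyRange_neg_one_eq_reverse, List.pairwise_reverse]
          exact PySem.List.pairwise_lt_pyRange_one _ _)
  have hpermA : ((PySem.List.sorted (PySem.Dict.counter questions).items (fun x => x.2) true).map Prod.snd).Perm
      (PySem.Dict.counter questions).values := by
    have h := (PySem.List.sorted_perm (PySem.Dict.counter questions).items (fun x : Int × Int => x.2) true).map Prod.snd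
    simpa only [PySem.Dict.values] using h
  have hsortA : ((PySem.List.sorted (PySem.Dict.counter questions).items (fun x => x.2) true).map Prod.snd).Pairwise (· ≥ ·) := by
    rw [List.pairwise_map]
    exact PySem.List.sorted_pairwise_rev (PySem.Dict.counter questions).items (fun x : Int × Int => x.2)
  exact (hpermA.trans hpermB.symm).eq_of_pairwise (fun _ _ _ _ h1 h2 => le_antisymm h2 h1) hsortA hsortB

theorem halfQuestions_spec : Claim_equal_halfQuestions := by
  intro questions _
  unfold Spec_halfQuestions halfQuestions halfQuestions_alt
  by_cases hq : questions = []
  · subst hq; rfl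
  · rw [if_neg hq]
    simp only []
    set bucket := PySem.Dict.counter (PySem.Dict.counter questions).values with hbdef
    set maxf := (PySem.List.max? bucket.keys (fun x => x)).getD 0 with hmdef
    have hsome : ∃ m, PySem.List.max? bucket.keys (fun x => x) = some m := by
      rcases h : PySem.List.max? bucket.keys (fun x => x) with _ | m
      · exfalso
        rw [PySem.List.max?_eq_none_iff] at h
        rw [hbdef, PySem.Dict.keys_counter] at h
        rcases List.exists_mem_of_ne_nil questions hq with ⟨q, hqmem⟩
        have hvne : (PySem.Dict.counter questions).values ≠ [] := by
          intro hnil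
          have : (q, (questions.count q : Int)) ∈ (PySem.Dict.counter questions).items := by
            rw [PySem.Dict.items_counter]
            exact List.mem_map.mpr ⟨q, (PySem.Set.mem_ofList questions q).mpr hqmem, rfl⟩
          have : (questions.count q : Int) ∈ (PySem.Dict.counter questions).values := by
            simp only [PySem.Dict.values]
            exact List.mem_map.mpr ⟨_, this, rfl⟩
          simp [hnil] at this
        rcases List.exists_mem_of_ne_nil _ hvne with ⟨v, hv⟩
        have : v ∈ PySem.Set.ofList (PySem.Dict.counter questions).values :=
          (PySem.Set.mem_ofList _ v).mpr hv
        simp [h] at this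
      · exact ⟨m, rfl⟩
    obtain ⟨m, hm⟩ := hsome
    have hM : ∀ v ∈ (PySem.Dict.counter questions).values, v ≤ maxf := by
      intro v hv
      have hvk : v ∈ bucket.keys := by
        rw [hbdef, PySem.Dict.keys_counter]
        exact (PySem.Set.mem_ofList _ v).mpr hv
      have := PySem.List.max?_isMax hm v hvk
      rw [hmdef, hm]
      exact this
    have hpos : ∀ f ∈ PySem.List.pyRange maxf 0 (-1), 0 < f := by
      intro f hf
      exact (PySem.List.mem_pyRange_neg_one.mp hf).1
    have hnn : ∀ f : Int, 0 ≤ bucket.getD f 0 := by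
      intro f
      rw [hbdef, PySem.Dict.getD_counter]
      exact Int.natCast_nonneg _
    rw [pvALoop_eq_greedy, pvBOuter_eq_greedy _ _ _ hpos hnn, pvCounts_eq questions maxf hM]
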